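-- pv_equiv track=rewrite | github.com/thepratholic/Competitive-Programming | LeetCode/Biweekly contest 163/Number of Perfect Pairs.py | perfectPairs
-- ===== SOURCE A (Python) =====
-- from typing import List
--
-- def perfectPairs(nums: List[int]) -> int:
--     nums = [abs(x) for x in nums]
--     nums.sort()
--     n = len(nums)
--     ans = 0
--     j = 0
--     for i in range(n - 1):
--         a = nums[i]
--
--         while j < n and nums[j] <= 2 * a:
--             j += 1
--
--         ans += (j - i - 1)
--
--     return ans
-- ===== SOURCE B (Python) =====
-- from typing import List
-- from bisect import bisect_right
--
-- def perfectPairs(nums: List[int]) -> int: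
--     nums = sorted(abs(x) for x in nums)
--     n = len(nums)
--     ans = 0
--     for i in range(n - 1):
--         ans += bisect_right(nums, 2 * nums[i]) - i - 1
--     return ans
-- ===== Notes on version B (the rewrite author's own statement) =====
-- stated objective: alternative
-- what changed: replaces A's stateful monotonic two-pointer sweep (inner while advancing a shared j) with an independent binary search (bisect_right) per element over the sorted array
import Mathlib
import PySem

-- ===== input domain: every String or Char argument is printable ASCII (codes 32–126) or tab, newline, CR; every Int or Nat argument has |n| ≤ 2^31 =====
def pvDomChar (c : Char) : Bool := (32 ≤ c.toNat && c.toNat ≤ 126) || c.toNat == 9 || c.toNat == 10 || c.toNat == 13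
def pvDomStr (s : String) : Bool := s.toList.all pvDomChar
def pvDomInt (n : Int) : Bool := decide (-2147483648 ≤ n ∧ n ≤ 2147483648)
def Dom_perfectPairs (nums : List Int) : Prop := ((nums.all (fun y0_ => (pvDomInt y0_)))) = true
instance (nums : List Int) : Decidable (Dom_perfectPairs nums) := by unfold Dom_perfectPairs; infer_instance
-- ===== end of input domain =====

-- B replaces A's stateful two-pointer sweep (a shared index j advanced by an inner while)
-- with an independent bisect_right binary search per element; same cost class, clearer structure.

-- ===== PORT A =====
-- inner 'while j < n and nums[j] <= 2 * a: j += 1'; nums[j] is always in range when read (j < n)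
def pvWhileA (l : List Int) (n a j : Int) : Int :=
  if h : j < n ∧ PySem.List.pyGetD l j 0 ≤ 2 * a then
    pvWhileA l n a (j + 1)
  else j
termination_by (n - j).toNat
decreasing_by omega

def perfectPairs (nums : List Int) : Int :=
  let l := PySem.List.sorted (nums.map (fun x => |x|)) (fun x => x)
  let n : Int := l.length
  let st := (PySem.List.pyRange 0 (n - 1) 1).foldl
    (fun (st : Int × Int) i =>
      let a := PySem.List.pyGetD l i 0
      let j := pvWhileA l n a st.2
      (st.1 + (j - i - 1), j)) (0, 0)
  st.1

-- ===== PORT B =====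
def perfectPairs_alt (nums : List Int) : Int :=
  let l := PySem.List.sorted (nums.map (fun x => |x|)) (fun x => x)
  let n : Int := l.length
  (PySem.List.pyRange 0 (n - 1) 1).foldl
    (fun ans i =>
      ans + ((PySem.List.bisectRight l (2 * PySem.List.pyGetD l i 0) : Int) - i - 1)) 0

-- ===== PRECONDITION & SPEC =====
def Spec_perfectPairs (nums : List Int) (out : Int) : Prop := out = perfectPairs_alt nums
instance (nums : List Int) (out : Int) : Decidable (Spec_perfectPairs nums out) := by unfold Spec_perfectPairs; infer_instance

-- ===== CLAIM (what is proved, stated in full; the proofs are below) =====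
def Claim_equal_perfectPairs : Prop := ∀ (nums : List Int), Dom_perfectPairs nums → Spec_perfectPairs nums (perfectPairs nums)

-- ===== LEMMAS AND PROOFS =====

-- position/value characterisation of bisect_right on a sorted list
theorem pv_bisect_lt_iff (l : List Int) (hs : l.Pairwise (· ≤ ·)) (t : Int)
    (j : Nat) (hj : j < l.length) :
    l[j] ≤ t ↔ j < PySem.List.bisectRight l t := by
  obtain ⟨_, h2, h3⟩ := PySem.List.bisectRight_spec l t hs
  constructor
  · intro hle
    by_contra hnot
    exact absurd hle (not_le.mpr (h3 j hj (by omega)))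
  · intro hlt
    exact h2 j hj hlt

theorem pv_bisect_le_length (l : List Int) (t : Int) (hs : l.Pairwise (· ≤ ·)) :
    PySem.List.bisectRight l t ≤ l.length :=
  (PySem.List.bisectRight_spec l t hs).1

theorem pv_bisect_mono (l : List Int) (hs : l.Pairwise (· ≤ ·)) {t t' : Int} (h : t ≤ t') :
    PySem.List.bisectRight l t ≤ PySem.List.bisectRight l t' := by
  by_contra hnot
  push Not at hnot
  have hjlt : PySem.List.bisectRight l t' < l.length :=
    lt_of_lt_of_le hnot (pv_bisect_le_length l t hs)
  have h1 : l[PySem.List.bisectRight l t'] ≤ t :=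
    (pv_bisect_lt_iff l hs t _ hjlt).mpr hnot
  have h2 : ¬ l[PySem.List.bisectRight l t'] ≤ t' :=
    fun hle => by
      have := (pv_bisect_lt_iff l hs t' _ hjlt).mp hle
      omega
  exact h2 (le_trans h1 h)

-- A's while loop, started at any j below bisect_right, stops exactly at bisect_right
theorem pv_whileA_eq (l : List Int) (hs : l.Pairwise (· ≤ ·)) (a : Int) :
    ∀ (fuel : Nat) (j : Int), ((l.length : Int) - j).toNat ≤ fuel → 0 ≤ j →
      j ≤ (PySem.List.bisectRight l (2 * a) : Int) →
      pvWhileA l l.length a j = (PySem.List.bisectRight l (2 * a) : Int) := by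
  intro fuel
  induction fuel with
  | zero =>
    intro j hf h0 hle
    have hc := pv_bisect_le_length l (2 * a) hs
    rw [pvWhileA]
    rw [dif_neg]
    · omega
    · intro ⟨hjn, _⟩; omega
  | succ f ih =>
    intro j hf h0 hle
    have hc := pv_bisect_le_length l (2 * a) hs
    rw [pvWhileA]
    split_ifs with h
    · obtain ⟨hjn, hval⟩ := h
      have hjnat : j.toNat < l.length := by omega
      rw [PySem.List.pyGetD_eq_getElem l 0 h0 (by omega)] at hval
      have hlt := (pv_bisect_lt_iff l hs (2 * a) j.toNat hjnat).mp hval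
      exact ih (j + 1) (by omega) (by omega) (by omega)
    · -- loop exits: j = bisectRight
      by_contra hne
      have hjc : j < (PySem.List.bisectRight l (2 * a) : Int) := by omega
      have hjn : j < (l.length : Int) := by omega
      have hjnat : j.toNat < l.length := by omega
      have hval : l[j.toNat] ≤ 2 * a :=
        (pv_bisect_lt_iff l hs (2 * a) j.toNat hjnat).mpr (by omega)
      exact h ⟨hjn, by rw [PySem.List.pyGetD_eq_getElem l 0 h0 (by omega)]; exact hval⟩

-- the step functions of the two folds
theorem pv_fold_inv (l : List Int) (hs : l.Pairwise (· ≤ ·)) :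
    ∀ (m : Nat), m < l.length →
      (PySem.List.pyRange 0 (m : Int) 1).foldl
        (fun (st : Int × Int) i =>
          (st.1 + (pvWhileA l l.length (PySem.List.pyGetD l i 0) st.2 - i - 1),
           pvWhileA l l.length (PySem.List.pyGetD l i 0) st.2)) (0, 0)
      = ((PySem.List.pyRange 0 (m : Int) 1).foldl
          (fun ans i =>
            ans + ((PySem.List.bisectRight l (2 * PySem.List.pyGetD l i 0) : Int) - i - 1)) 0,
         if m = 0 then 0
         else (PySem.List.bisectRight l (2 * l.getD (m - 1) 0) : Int)) := by
  intro m
  induction m with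
  | zero =>
    intro _
    simp [PySem.List.pyRange_one_eq_nil (le_refl (0 : Int))]
  | succ m ih =>
    intro hm1
    have hm : m < l.length := by omega
    have hcast : ((m + 1 : Nat) : Int) = (m : Int) + 1 := by push_cast; ring
    rw [hcast, PySem.List.pyRange_one_succ_right (by positivity), List.foldl_append,
      List.foldl_append, ih hm]
    simp only [List.foldl_cons, List.foldl_nil]
    -- the element read at index m
    have hgd : PySem.List.pyGetD l ((m : Int)) 0 = l.getD m 0 := PySem.List.pyGetD_natCast l m 0
    -- previous j is below the new bisect position
    have hjle : (if m = 0 then (0 : Int)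
        else (PySem.List.bisectRight l (2 * l.getD (m - 1) 0) : Int))
        ≤ (PySem.List.bisectRight l (2 * PySem.List.pyGetD l ((m : Int)) 0) : Int) := by
      by_cases h0 : m = 0
      · simp [h0]
      · rw [if_neg h0, hgd]
        have hmono : PySem.List.bisectRight l (2 * l.getD (m - 1) 0)
            ≤ PySem.List.bisectRight l (2 * l.getD m 0) := by
          apply pv_bisect_mono l hs
          have h1 : l.getD (m - 1) 0 = l[m - 1]'(by omega) := List.getD_eq_getElem l 0 (by omega)
          have h2 : l.getD m 0 = l[m]'hm := List.getD_eq_getElem l 0 hm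
          rw [h1, h2]
          have := List.pairwise_iff_getElem.mp hs (m - 1) m (by omega) hm (by omega)
          omega
        exact_mod_cast hmono
    have hw := pv_whileA_eq l hs (PySem.List.pyGetD l ((m : Int)) 0) (l.length + 1)
      (if m = 0 then (0 : Int)
        else (PySem.List.bisectRight l (2 * l.getD (m - 1) 0) : Int))
      (by split_ifs <;> omega) (by split_ifs <;> omega) hjle
    rw [hw]
    refine Prod.ext rfl ?_
    simp only [Nat.add_sub_cancel, hgd]
    rw [if_neg (by omega : ¬ m + 1 = 0)]

theorem perfectPairs_eq (nums : List Int) : perfectPairs nums = perfectPairs_alt nums := by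
  unfold perfectPairs perfectPairs_alt
  have hs : (PySem.List.sorted (nums.map (fun x => |x|)) (fun x => x)).Pairwise (· ≤ ·) :=
    PySem.List.sorted_pairwise (nums.map (fun x => |x|)) (fun x => x)
  set l := PySem.List.sorted (nums.map (fun x => |x|)) (fun x => x) with hl
  change (List.foldl
      (fun (st : Int × Int) i =>
        (st.1 + (pvWhileA l l.length (PySem.List.pyGetD l i 0) st.2 - i - 1),
         pvWhileA l l.length (PySem.List.pyGetD l i 0) st.2)) (0, 0)
      (PySem.List.pyRange 0 ((l.length : Int) - 1) 1)).1
    = List.foldl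
        (fun ans i =>
          ans + ((PySem.List.bisectRight l (2 * PySem.List.pyGetD l i 0) : Int) - i - 1)) 0
        (PySem.List.pyRange 0 ((l.length : Int) - 1) 1)
  rcases Nat.eq_zero_or_pos l.length with h0 | hpos
  · rw [PySem.List.pyRange_one_eq_nil (by omega : ((l.length : Int) - 1) ≤ 0)]
    rfl
  · have hcast : ((l.length : Int) - 1) = ((l.length - 1 : Nat) : Int) := by omega
    rw [hcast]
    have := congrArg Prod.fst (pv_fold_inv l hs (l.length - 1) (by omega))
    exact this

-- ===== VERDICT (by name: the statement is the Claim_ definition above) =====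
theorem perfectPairs_spec : Claim_equal_perfectPairs := by
  intro nums _
  unfold Spec_perfectPairs
  exact perfectPairs_eq nums
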